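-- pv_equiv track=rewrite | github.com/omtarful/scripting-practice | python/interactionAnalyzer.py | findInteractions
-- ===== SOURCE A (Python) =====
-- def getInteraction(idA, idB, columnA, columnB, index = 0):
--     for i in range(index, len(columnA)):
--         if(idB == columnA[i] and columnB[i] == idA):
--             return i
--     return -1
--
-- def findInteractions(columnA, columnB):
--     interactions = []
--     for i in range(len(columnA)):
--         inde = getInteraction(columnA[i], columnB[i], columnA,columnB ,i+1)
--         if inde != -1:
--             interactions.append(i)
--             interactions.append(inde)
--     return interactions
-- ===== SOURCE B (Python) =====
-- from bisect import bisect_right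
--
-- def findInteractions(columnA, columnB):
--     # index of every (A[j], B[j]) pair -> increasing list of positions j
--     positions = {}
--     n = len(columnA)
--     for j in range(n):
--         positions.setdefault((columnA[j], columnB[j]), []).append(j)
--     out = []
--     for i in range(n):
--         lst = positions.get((columnB[i], columnA[i]), [])
--         k = bisect_right(lst, i)
--         if k < len(lst):
--             out.append(i)
--             out.append(lst[k])
--     return out
-- ===== Notes on version B (the rewrite author's own statement) =====
-- stated objective: faster
-- what changed: Replaces A's per-index linear rescan of the whole tail (getInteraction) by a hash map from (A[j],B[j]) pairs to their increasing index lists built in one pass, then a bisect per index to find the smallest matching j>i.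
import Mathlib
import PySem

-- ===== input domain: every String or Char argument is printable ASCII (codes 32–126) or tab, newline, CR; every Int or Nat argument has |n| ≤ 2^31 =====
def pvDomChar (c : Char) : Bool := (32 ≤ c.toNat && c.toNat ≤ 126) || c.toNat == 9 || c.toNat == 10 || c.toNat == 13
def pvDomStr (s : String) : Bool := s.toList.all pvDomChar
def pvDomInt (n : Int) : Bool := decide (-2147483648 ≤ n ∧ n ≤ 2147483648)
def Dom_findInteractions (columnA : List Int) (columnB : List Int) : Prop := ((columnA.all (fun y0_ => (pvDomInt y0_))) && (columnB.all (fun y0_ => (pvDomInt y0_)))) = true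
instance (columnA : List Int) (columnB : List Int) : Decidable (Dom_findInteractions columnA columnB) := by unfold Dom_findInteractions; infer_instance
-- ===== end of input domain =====

-- B replaces A's linear rescan of the tail per index by a map (pair → increasing index list) plus a bisect per index.

-- ===== PORT A =====
-- getInteraction: linear scan from `index`; all list reads are in range on Pre_ inputs, ported with getD.
def getInteraction (idA : Int) (idB : Int) (columnA : List Int) (columnB : List Int) (index : Nat) : Int :=
  if _h : index < columnA.length then
    if idB = columnA.getD index 0 ∧ columnB.getD index 0 = idA then (index : Int)
    else getInteraction idA idB columnA columnB (index + 1)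
  else -1
termination_by columnA.length - index

def findInteractions (columnA : List Int) (columnB : List Int) : List Int :=
  (List.range columnA.length).foldl (fun interactions i =>
    let inde := getInteraction (columnA.getD i 0) (columnB.getD i 0) columnA columnB (i + 1)
    if inde ≠ -1 then interactions ++ [(i : Int), inde] else interactions) []

-- ===== PORT B =====
-- positions.setdefault(key, []).append(j) is d[key] = d.get(key, []) + [j], i.e. Dict.modify;
-- bisect.bisect_right is PySem.List.bisectRight.
def findInteractions_alt (columnA : List Int) (columnB : List Int) : List Int :=
  let n := columnA.length
  let positions :=
    (List.range n).foldl
      (fun d j => d.modify (columnA.getD j 0, columnB.getD j 0) [] (fun l => l ++ [(j : Int)]))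
      PySem.Dict.empty
  (List.range n).foldl (fun out i =>
    let lst := positions.getD (columnB.getD i 0, columnA.getD i 0) []
    let k := PySem.List.bisectRight lst (i : Int)
    if hk : k < lst.length then out ++ [(i : Int), lst[k]] else out) []

-- ===== PRECONDITION & SPEC =====
-- Pre_ excludes exactly the inputs on which A raises IndexError (columnB shorter than columnA:
-- columnB[i] is read for every i < len(columnA)); B raises there too.
def Pre_findInteractions (columnA : List Int) (columnB : List Int) : Prop :=
  columnA.length ≤ columnB.length
instance (columnA : List Int) (columnB : List Int) : Decidable (Pre_findInteractions columnA columnB) := by unfold Pre_findInteractions; infer_instance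

def pvWitness_findInteractions : List Int × List Int := ([1, 2, 2, 1], [2, 1, 1, 2])

def Spec_findInteractions (columnA : List Int) (columnB : List Int) (out : List Int) : Prop := out = findInteractions_alt columnA columnB
instance (columnA : List Int) (columnB : List Int) (out : List Int) : Decidable (Spec_findInteractions columnA columnB out) := by unfold Spec_findInteractions; infer_instance

-- ===== CLAIM (what is proved, stated in full; the proofs are below) =====
def Claim_equal_findInteractions : Prop := ∀ (columnA : List Int) (columnB : List Int), Dom_findInteractions columnA columnB → Pre_findInteractions columnA columnB → Spec_findInteractions columnA columnB (findInteractions columnA columnB)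

-- ===== LEMMAS AND PROOFS =====

-- find? only looks at the predicate's values on the list's members
lemma find?_mem_congr {α : Type} (p q : α → Bool) (l : List α) (h : ∀ x ∈ l, p x = q x) :
    l.find? p = l.find? q := by
  induction l with
  | nil => rfl
  | cons a l ih =>
    simp only [List.find?]
    rw [h a (by simp)]
    cases q a <;> simp [ih (fun x hx => h x (by simp [hx]))]

-- a find? whose first k elements fail p and whose remaining elements satisfy p yields element k
lemma find?_eq_getElem? {α : Type} (xs : List α) (p : α → Bool) (k : Nat)
    (h1 : ∀ j (hj : j < xs.length), j < k → p xs[j] = false)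
    (h2 : ∀ j (hj : j < xs.length), k ≤ j → p xs[j] = true) :
    xs.find? p = xs[k]? := by
  induction xs generalizing k with
  | nil => simp
  | cons a xs ih =>
    cases k with
    | zero =>
      have := h2 0 (by simp) (by omega)
      simp at this
      simp [List.find?, this]
    | succ k =>
      have ha := h1 0 (by simp) (by omega)
      simp at ha
      simp [List.find?, ha]
      exact ih k (fun j hj hk => h1 (j+1) (by simpa using Nat.succ_lt_succ hj) (by omega))
        (fun j hj hk => h2 (j+1) (by simpa using Nat.succ_lt_succ hj) (by omega))

-- A's scan from s is find? over range' s (len - s)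
lemma getInteraction_eq (p q : Int) (cA cB : List Int) (s : Nat) :
    getInteraction p q cA cB s =
      match (List.range' s (cA.length - s)).find?
          (fun j => decide (q = cA.getD j 0 ∧ cB.getD j 0 = p)) with
      | some j => (j : Int)
      | none => -1 := by
  generalize hm : cA.length - s = m
  induction m generalizing s with
  | zero =>
    rw [getInteraction, dif_neg (by omega)]
    simp
  | succ m ih =>
    have hs : s < cA.length := by omega
    rw [getInteraction, dif_pos hs, List.range'_succ]
    by_cases hc : q = cA.getD s 0 ∧ cB.getD s 0 = p
    · rw [if_pos hc, List.find?_cons_of_pos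
        (by simp only [decide_eq_true_eq]; exact ⟨hc.1, hc.2⟩)]
    · rw [if_neg hc, List.find?_cons_of_neg
        (by simp only [decide_eq_true_eq]; simpa using hc),
        ← ih (s+1) (by omega)]

-- the grouping loop of B: the index list stored under `key` is the filtered range
lemma dict_lst (cA cB : List Int) (key : Int × Int) :
    ((List.range cA.length).foldl
        (fun d j => d.modify (cA.getD j 0, cB.getD j 0) [] (fun l => l ++ [(j : Int)]))
        PySem.Dict.empty).getD key [] =
    ((List.range cA.length).filter
        (fun j => (cA.getD j 0, cB.getD j 0) == key)).map (fun (j : Nat) => (j : Int)) := by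
  rw [← List.foldl_map
      (f := fun (j : Nat) => ((cA.getD j 0, cB.getD j 0), (j : Int)))
      (g := fun (d : PySem.Dict (Int × Int) (List Int)) (p : (Int × Int) × Int) =>
        d.modify p.1 [] (fun l => l ++ [p.2])),
    PySem.Dict.getD_foldl_modify_append, PySem.Dict.getD_empty,
    List.filter_map, List.map_map]
  simp [Function.comp_def, List.map_eq_flatMap]

-- per-index body of B equals the find?-over-the-tail form
lemma body_eq (cA cB : List Int) (i : Nat) (hi : i < cA.length) (out : List Int) :
    (let lst := ((List.range cA.length).foldl
        (fun d j => d.modify (cA.getD j 0, cB.getD j 0) [] (fun l => l ++ [(j : Int)]))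
        PySem.Dict.empty).getD (cB.getD i 0, cA.getD i 0) []
     let k := PySem.List.bisectRight lst (i : Int)
     if hk : k < lst.length then out ++ [(i : Int), lst[k]] else out) =
    (match (List.range' (i+1) (cA.length - (i+1))).find?
        (fun j => decide (cB.getD i 0 = cA.getD j 0 ∧ cB.getD j 0 = cA.getD i 0)) with
     | some j => out ++ [(i : Int), (j : Int)]
     | none => out) := by
  rw [dict_lst]
  set g := (List.range cA.length).filter
      (fun j => (cA.getD j 0, cB.getD j 0) == (cB.getD i 0, cA.getD i 0)) with hg
  set lst := g.map (fun (j : Nat) => (j : Int)) with hlst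
  have hsorted : lst.Pairwise (· ≤ ·) := by
    rw [hlst]
    refine List.pairwise_map.mpr ?_
    exact ((List.pairwise_lt_range).filter _).imp (fun h => by exact_mod_cast le_of_lt h)
  set k := PySem.List.bisectRight lst (i : Int) with hk
  obtain ⟨hk1, hk2, hk3⟩ := PySem.List.bisectRight_spec lst (i : Int) hsorted
  have hfind : lst.find? (fun y => decide ((i : Int) < y)) = lst[k]? := by
    refine find?_eq_getElem? lst _ k (fun j hj hjk => ?_) (fun j hj hjk => ?_)
    · simpa using not_lt.mpr (hk2 j hj hjk)
    · simpa using hk3 j hj hjk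
  have hstep : (if hn : k < lst.length then out ++ [(i : Int), lst[k]] else out) =
      (match lst.find? (fun y => decide ((i : Int) < y)) with
       | some v => out ++ [(i : Int), v]
       | none => out) := by
    rw [hfind]
    by_cases hn : k < lst.length
    · rw [dif_pos hn, List.getElem?_eq_getElem hn]
    · rw [dif_neg hn, List.getElem?_eq_none (by omega)]
  rw [hstep, hlst, List.find?_map]
  have hcomp : ((fun y => decide ((i : Int) < y)) ∘ (fun (j : Nat) => (j : Int)))
      = fun j => decide (i < j) := by
    funext j; simp
  rw [hcomp, hg, List.find?_filter]
  have hsplit : List.range cA.length = List.range' 0 (i+1) ++ List.range' (i+1) (cA.length - (i+1)) := by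
    have h2 := List.range'_append (s := 0) (m := i+1) (n := cA.length - (i+1)) (step := 1)
    rw [List.range_eq_range', show cA.length = (i+1) + (cA.length - (i+1)) from by omega, ← h2]
    norm_num
  rw [hsplit, List.find?_append]
  have hnone : (List.range' 0 (i+1)).find?
      (fun a => decide (((cA.getD a 0, cB.getD a 0) == (cB.getD i 0, cA.getD i 0)) = true ∧ decide (i < a) = true)) = none := by
    refine List.find?_eq_none.mpr (fun x hx => ?_)
    have : x < i + 1 := by simpa using (List.mem_range'_1.mp hx).2
    simp
    omega
  rw [hnone, Option.none_or]
  have hpred : ∀ x ∈ List.range' (i+1) (cA.length - (i+1)),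
      (fun a => decide (((cA.getD a 0, cB.getD a 0) == (cB.getD i 0, cA.getD i 0)) = true ∧ decide (i < a) = true)) x
      = (fun j => decide (cB.getD i 0 = cA.getD j 0 ∧ cB.getD j 0 = cA.getD i 0)) x := by
    intro x hx
    have hix : i < x := by
      have := (List.mem_range'_1.mp hx).1
      omega
    simp only [Prod.mk.injEq, beq_iff_eq, hix, and_true, decide_true]
    rw [decide_eq_decide]
    constructor
    · rintro ⟨h1, h2⟩; exact ⟨h1.symm, h2⟩
    · rintro ⟨h1, h2⟩; exact ⟨h1.symm, h2⟩
  rw [find?_mem_congr _ _ _ hpred]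
  cases (List.range' (i+1) (cA.length - (i+1))).find?
      (fun j => decide (cB.getD i 0 = cA.getD j 0 ∧ cB.getD j 0 = cA.getD i 0)) with
  | none => rfl
  | some j => rfl

-- ===== VERDICT (by name: the statement is the Claim_ definition above) =====
theorem findInteractions_spec : Claim_equal_findInteractions := by
  intro cA cB _ _
  unfold Spec_findInteractions findInteractions findInteractions_alt
  refine (PySem.List.foldl_congr_mem _ _ _ _ (fun out i hi => ?_)).symm
  have hi' : i < cA.length := List.mem_range.mp hi
  rw [body_eq cA cB i hi' out, getInteraction_eq]
  cases (List.range' (i+1) (cA.length - (i+1))).find?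
      (fun j => decide (cB.getD i 0 = cA.getD j 0 ∧ cB.getD j 0 = cA.getD i 0)) with
  | none => simp
  | some j =>
    have : (j : Int) ≠ -1 := by omega
    simp [this]
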